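-- pv_equiv track=rewrite | github.com/temnoon/rho | api/archive_main_original.py | extract_thematic_insight
-- ===== SOURCE A (Python) =====
-- def extract_thematic_insight(narrative_summaries: list, book_meta: dict) -> str:
--     """Extract thematic insights from narrative summaries"""
--     if not narrative_summaries:
--         return f"Thematic development begins in {book_meta.get('title', 'this work')}."
--
--     # Analyze themes across summaries
--     all_summaries = " ".join([ns["summary"] for ns in narrative_summaries])
--
--     # Theme detection patterns
--     themes = []
--     if any(word in all_summaries.lower() for word in ['journey', 'path', 'way', 'travel']):
--         themes.append("journey/transformation")
--     if any(word in all_summaries.lower() for word in ['love', 'heart', 'emotion', 'feeling']):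
--         themes.append("emotional development")
--     if any(word in all_summaries.lower() for word in ['power', 'control', 'authority', 'rule']):
--         themes.append("power dynamics")
--     if any(word in all_summaries.lower() for word in ['truth', 'real', 'honest', 'lie']):
--         themes.append("truth vs deception")
--     if any(word in all_summaries.lower() for word in ['grow', 'change', 'become', 'transform']):
--         themes.append("personal growth")
--
--     # Character development
--     if any(word in all_summaries.lower() for word in ['character', 'person', 'man', 'woman', 'child']):
--         themes.append("character development")
--
--     primary_theme = themes[0] if themes else "narrative progression"
--     title = book_meta.get("title", "this work")
--     author = book_meta.get("author", "the author")
--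
--     return f"{author}'s exploration of {primary_theme} deepens in {title}, as characters navigate complex situations that reveal underlying patterns of meaning."
-- ===== SOURCE B (Python) =====
-- # B: inverted keyword->priority index (alphabetical) + min-reduce, instead of
-- # A's six ordered group checks that build a themes list and take themes[0].
-- _KEYWORD_PRIORITY = {
--     'authority': 2, 'become': 4, 'change': 4, 'character': 5, 'child': 5,
--     'control': 2, 'emotion': 1, 'feeling': 1, 'grow': 4, 'heart': 1,
--     'honest': 3, 'journey': 0, 'lie': 3, 'love': 1, 'man': 5, 'path': 0,
--     'person': 5, 'power': 2, 'real': 3, 'rule': 2, 'transform': 4,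
--     'travel': 0, 'truth': 3, 'way': 0, 'woman': 5,
-- }
-- _THEME_LABELS = [
--     "journey/transformation", "emotional development", "power dynamics",
--     "truth vs deception", "personal growth", "character development",
--     "narrative progression",
-- ]
--
-- def extract_thematic_insight(narrative_summaries: list, book_meta: dict) -> str:
--     if not narrative_summaries:
--         return f"Thematic development begins in {book_meta.get('title', 'this work')}."
--     text = " ".join(ns["summary"] for ns in narrative_summaries).lower()
--     best = 6
--     for kw, pri in _KEYWORD_PRIORITY.items():
--         if pri < best and kw in text:
--             best = pri
--     primary_theme = _THEME_LABELS[best]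
--     title = book_meta.get("title", "this work")
--     author = book_meta.get("author", "the author")
--     return f"{author}'s exploration of {primary_theme} deepens in {title}, as characters navigate complex situations that reveal underlying patterns of meaning."
-- ===== Notes on version B (the rewrite author's own statement) =====
-- stated objective: alternative
-- what changed: Replaces A's six ordered if/any group checks that build a themes list (then take themes[0]) with an inverted keyword-to-priority map (keys alphabetical) reduced in one pass to the minimum priority of any keyword found in the once-lowercased text; the label is then looked up by that priority index.
import Mathlib
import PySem

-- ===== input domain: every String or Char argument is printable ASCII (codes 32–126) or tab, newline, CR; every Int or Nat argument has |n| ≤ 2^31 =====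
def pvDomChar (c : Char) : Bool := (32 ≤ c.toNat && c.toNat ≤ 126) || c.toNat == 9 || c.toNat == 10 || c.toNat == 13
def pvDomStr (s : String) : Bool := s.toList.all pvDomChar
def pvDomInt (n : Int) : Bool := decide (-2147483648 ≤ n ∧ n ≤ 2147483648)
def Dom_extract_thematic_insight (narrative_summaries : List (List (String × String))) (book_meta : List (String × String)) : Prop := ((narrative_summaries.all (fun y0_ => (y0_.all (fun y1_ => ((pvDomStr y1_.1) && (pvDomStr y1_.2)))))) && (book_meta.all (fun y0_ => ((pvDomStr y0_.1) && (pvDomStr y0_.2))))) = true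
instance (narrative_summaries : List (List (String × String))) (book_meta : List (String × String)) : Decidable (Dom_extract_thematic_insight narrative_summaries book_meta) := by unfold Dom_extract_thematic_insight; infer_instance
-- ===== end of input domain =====

-- B's change: an inverted keyword->priority map (alphabetical) with a single min-reduce pass
-- replaces A's six ordered group checks that build a themes list (objective: alternative).

-- ===== PORT A =====
-- dict lookup with default (assoc list, first match)
def pvGetD (m : List (String × String)) (k : String) (d : String) : String :=
  ((m.find? (fun p => p.1 == k)).map (·.2)).getD d

-- themes[0] if themes else "narrative progression"
def pvHeadD (l : List String) : String :=
  match l with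
  | [] => "narrative progression"
  | t :: _ => t

-- ns["summary"] (KeyError if absent: excluded by Pre_; getD "" never reached inside Pre_)
def pvSummary (ns : List (String × String)) : String :=
  ((ns.find? (fun p => p.1 == "summary")).map (·.2)).getD ""

def extract_thematic_insight (narrative_summaries : List (List (String × String))) (book_meta : List (String × String)) : String :=
  if narrative_summaries.isEmpty then
    "Thematic development begins in " ++ pvGetD book_meta "title" "this work" ++ "."
  else
    let all_summaries := PySem.Str.join " " (narrative_summaries.map pvSummary)
    let t1 := if ["journey", "path", "way", "travel"].any (fun w => PySem.Str.isIn w (PySem.Str.lower all_summaries)) then ["journey/transformation"] else []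
    let t2 := if ["love", "heart", "emotion", "feeling"].any (fun w => PySem.Str.isIn w (PySem.Str.lower all_summaries)) then ["emotional development"] else []
    let t3 := if ["power", "control", "authority", "rule"].any (fun w => PySem.Str.isIn w (PySem.Str.lower all_summaries)) then ["power dynamics"] else []
    let t4 := if ["truth", "real", "honest", "lie"].any (fun w => PySem.Str.isIn w (PySem.Str.lower all_summaries)) then ["truth vs deception"] else []
    let t5 := if ["grow", "change", "become", "transform"].any (fun w => PySem.Str.isIn w (PySem.Str.lower all_summaries)) then ["personal growth"] else []
    let t6 := if ["character", "person", "man", "woman", "child"].any (fun w => PySem.Str.isIn w (PySem.Str.lower all_summaries)) then ["character development"] else []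
    let themes := t1 ++ t2 ++ t3 ++ t4 ++ t5 ++ t6
    let primary_theme := pvHeadD themes
    let title := pvGetD book_meta "title" "this work"
    let author := pvGetD book_meta "author" "the author"
    author ++ "'s exploration of " ++ primary_theme ++ " deepens in " ++ title ++ ", as characters navigate complex situations that reveal underlying patterns of meaning."

-- ===== PORT B =====
def pvGetDB (m : List (String × String)) (k : String) (d : String) : String :=
  ((m.find? (fun p => p.1 == k)).map (·.2)).getD d

def pvSummaryB (ns : List (String × String)) : String :=
  ((ns.find? (fun p => p.1 == "summary")).map (·.2)).getD ""

-- _KEYWORD_PRIORITY: keyword -> theme priority, keys alphabetical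
def pvKeywordPriority : List (String × Nat) :=
  [("authority", 2), ("become", 4), ("change", 4), ("character", 5), ("child", 5),
   ("control", 2), ("emotion", 1), ("feeling", 1), ("grow", 4), ("heart", 1),
   ("honest", 3), ("journey", 0), ("lie", 3), ("love", 1), ("man", 5), ("path", 0),
   ("person", 5), ("power", 2), ("real", 3), ("rule", 2), ("transform", 4),
   ("travel", 0), ("truth", 3), ("way", 0), ("woman", 5)]

def pvThemeLabels : List String :=
  ["journey/transformation", "emotional development", "power dynamics",
   "truth vs deception", "personal growth", "character development",
   "narrative progression"]

def extract_thematic_insight_alt (narrative_summaries : List (List (String × String))) (book_meta : List (String × String)) : String :=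
  if narrative_summaries.isEmpty then
    "Thematic development begins in " ++ pvGetDB book_meta "title" "this work" ++ "."
  else
    let text := PySem.Str.lower (PySem.Str.join " " (narrative_summaries.map pvSummaryB))
    let best := pvKeywordPriority.foldl
      (fun b p => if p.2 < b && PySem.Str.isIn p.1 text then p.2 else b) 6
    let primary_theme := pvThemeLabels.getD best ""
    let title := pvGetDB book_meta "title" "this work"
    let author := pvGetDB book_meta "author" "the author"
    author ++ "'s exploration of " ++ primary_theme ++ " deepens in " ++ title ++ ", as characters navigate complex situations that reveal underlying patterns of meaning."

-- ===== PRECONDITION & SPEC =====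
-- Pre_ excludes exactly the inputs where A raises KeyError: a summary dict without the "summary" key.
def Pre_extract_thematic_insight (narrative_summaries : List (List (String × String))) (book_meta : List (String × String)) : Prop :=
  ∀ ns ∈ narrative_summaries, "summary" ∈ ns.map (·.1)
instance (narrative_summaries : List (List (String × String))) (book_meta : List (String × String)) : Decidable (Pre_extract_thematic_insight narrative_summaries book_meta) := by unfold Pre_extract_thematic_insight; infer_instance
def pvWitness_extract_thematic_insight : (List (List (String × String))) × (List (String × String)) :=
  ([[("summary", "a long journey home")]], [("title", "Roads"), ("author", "A. N. Author")])
def Spec_extract_thematic_insight (narrative_summaries : List (List (String × String))) (book_meta : List (String × String)) (out : String) : Prop := out = extract_thematic_insight_alt narrative_summaries book_meta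
instance (narrative_summaries : List (List (String × String))) (book_meta : List (String × String)) (out : String) : Decidable (Spec_extract_thematic_insight narrative_summaries book_meta out) := by unfold Spec_extract_thematic_insight; infer_instance

-- ===== CLAIM (what is proved, stated in full; the proofs are below) =====
def Claim_equal_extract_thematic_insight : Prop := ∀ (narrative_summaries : List (List (String × String))) (book_meta : List (String × String)), Dom_extract_thematic_insight narrative_summaries book_meta → Pre_extract_thematic_insight narrative_summaries book_meta → Spec_extract_thematic_insight narrative_summaries book_meta (extract_thematic_insight narrative_summaries book_meta)

-- ===== LEMMAS AND PROOFS =====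
-- B's per-keyword step function, abstracted over the membership test q
def pvStepF (q : String → Bool) (b : Nat) (p : String × Nat) : Nat :=
  if p.2 < b && q p.1 then p.2 else b

-- the same step rewritten with min
def pvStepG (q : String → Bool) (b : Nat) (p : String × Nat) : Nat :=
  if q p.1 then min b p.2 else b

lemma pvStepF_eq_G (q : String → Bool) : pvStepF q = pvStepG q := by
  funext b p
  cases hq : q p.1 <;> simp [pvStepF, pvStepG, hq] <;> split_ifs <;> omega

lemma pvStepG_comm (q : String → Bool) (x y : String × Nat) (z : Nat) :
    pvStepG q (pvStepG q z x) y = pvStepG q (pvStepG q z y) x := by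
  cases hx : q x.1 <;> cases hy : q y.1 <;>
    simp [pvStepG, hx, hy, min_right_comm]

-- the keyword/priority pairs reordered into A's group order
def pvGrouped : List (String × Nat) :=
  (["journey", "path", "way", "travel"].map (fun k => (k, 0))) ++
  (["love", "heart", "emotion", "feeling"].map (fun k => (k, 1))) ++
  (["power", "control", "authority", "rule"].map (fun k => (k, 2))) ++
  (["truth", "real", "honest", "lie"].map (fun k => (k, 3))) ++
  (["grow", "change", "become", "transform"].map (fun k => (k, 4))) ++
  (["character", "person", "man", "woman", "child"].map (fun k => (k, 5)))

lemma pvPerm : pvKeywordPriority.Perm pvGrouped := by decide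

lemma pvGroupFold (q : String → Bool) (ks : List String) (pri : Nat) :
    ∀ a, List.foldl (pvStepG q) a (ks.map (fun k => (k, pri)))
      = if ks.any q then min a pri else a := by
  induction ks with
  | nil => intro a; simp
  | cons k t ih =>
    intro a
    simp only [List.map_cons, List.foldl_cons, ih]
    cases hq : q k <;> cases ht : t.any q <;>
      simp [pvStepG, hq, ht, min_assoc]

-- first-match over the six groups = label of the min-reduced priority over all keywords
lemma pvMaster (q : String → Bool) :
    pvHeadD ((if (["journey", "path", "way", "travel"].any q) then ["journey/transformation"] else []) ++
             (if (["love", "heart", "emotion", "feeling"].any q) then ["emotional development"] else []) ++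
             (if (["power", "control", "authority", "rule"].any q) then ["power dynamics"] else []) ++
             (if (["truth", "real", "honest", "lie"].any q) then ["truth vs deception"] else []) ++
             (if (["grow", "change", "become", "transform"].any q) then ["personal growth"] else []) ++
             (if (["character", "person", "man", "woman", "child"].any q) then ["character development"] else []))
      = pvThemeLabels.getD
          (pvKeywordPriority.foldl (fun b p => if p.2 < b && q p.1 then p.2 else b) 6) "" := by
  have h1 : (fun (b : Nat) (p : String × Nat) => if p.2 < b && q p.1 then p.2 else b) = pvStepF q := rfl
  rw [h1, pvStepF_eq_G q,
      List.Perm.foldl_eq' pvPerm (fun x _ y _ z => pvStepG_comm q x y z) 6]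
  unfold pvGrouped
  simp only [List.foldl_append, pvGroupFold]
  cases hA : ["journey", "path", "way", "travel"].any q <;>
  cases hB : ["love", "heart", "emotion", "feeling"].any q <;>
  cases hC : ["power", "control", "authority", "rule"].any q <;>
  cases hD : ["truth", "real", "honest", "lie"].any q <;>
  cases hE : ["grow", "change", "become", "transform"].any q <;>
  cases hF : ["character", "person", "man", "woman", "child"].any q <;>
  simp [hA, hB, hC, hD, hE, hF, pvHeadD, pvThemeLabels]

-- ===== VERDICT (by name: the statement is the Claim_ definition above) =====
set_option maxRecDepth 4096 in
theorem extract_thematic_insight_spec : Claim_equal_extract_thematic_insight := by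
  intro ns bm _ _
  unfold Spec_extract_thematic_insight extract_thematic_insight extract_thematic_insight_alt
  cases ns with
  | nil => rfl
  | cons h t =>
    simp only [List.isEmpty_cons, Bool.false_eq_true, if_false]
    have hs : pvSummary = pvSummaryB := rfl
    have hg : pvGetD = pvGetDB := rfl
    rw [hs, hg, pvMaster (fun w => PySem.Str.isIn w (PySem.Str.lower (PySem.Str.join " " ((h :: t).map pvSummaryB))))]
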